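-- pv_equiv track=rewrite | github.com/yumerov/codewars | done/kyu-6/esolang-interpreters-1-introduction-to-esolangs-and-my-first-interpreter-ministringfuck.py | my_first_interpreter
-- ===== SOURCE A (Python) =====
-- def my_first_interpreter(code):
--     output = ''
--     pointer = 0
--
--     for command in code:
--         if command == '+':
--             pointer = (pointer + 1) % 256
--             continue
--
--         if command == '.':
--             output += chr(pointer)
--             continue
--
--     return output
-- ===== SOURCE B (Python) =====
-- def my_first_interpreter(code):
--     segments = code.split('.')
--     p = 0
--     out = []
--     for seg in segments[:-1]:
--         p = (p + seg.count('+')) % 256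
--         out.append(chr(p))
--     return ''.join(out)
-- ===== Notes on version B (the rewrite author's own statement) =====
-- stated objective: faster
-- what changed: B splits the code on '.' and, per segment, adds the segment's '+' count to the pointer mod 256 and emits one character, instead of A's per-character state machine over the whole string.
import Mathlib
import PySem

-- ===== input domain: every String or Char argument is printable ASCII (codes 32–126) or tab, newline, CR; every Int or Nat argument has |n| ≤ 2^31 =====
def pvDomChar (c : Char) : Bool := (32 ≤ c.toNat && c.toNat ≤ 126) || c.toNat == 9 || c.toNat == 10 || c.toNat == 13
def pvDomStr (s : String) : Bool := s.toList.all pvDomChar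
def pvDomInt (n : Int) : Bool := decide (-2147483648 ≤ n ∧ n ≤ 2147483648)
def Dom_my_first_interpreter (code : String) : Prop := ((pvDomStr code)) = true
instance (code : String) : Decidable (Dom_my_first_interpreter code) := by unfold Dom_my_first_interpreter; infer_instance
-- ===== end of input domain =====

-- B replaces A's per-character state machine by splitting the code on '.' and bulk-counting
-- '+' per segment (objective: faster by constant factor in Python via C-level split/count).

-- ===== PORT A =====
-- one loop step of A: '+' bumps the pointer mod 256, '.' appends chr(pointer), else no-op
def pvAStep (st : List Char × Nat) (command : Char) : List Char × Nat :=
  if command = '+' then (st.1, (st.2 + 1) % 256)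
  else if command = '.' then (st.1 ++ [Char.ofNat st.2], st.2)
  else st

def my_first_interpreter (code : String) : String :=
  String.ofList (code.toList.foldl pvAStep ([], 0)).1

-- ===== PORT B =====
-- one loop step of B: add the segment's '+' count to p mod 256 and emit chr(p)
def pvBStep (st : Nat × List Char) (seg : List Char) : Nat × List Char :=
  ((st.1 + seg.count '+') % 256, st.2 ++ [Char.ofNat ((st.1 + seg.count '+') % 256)])

def my_first_interpreter_alt (code : String) : String :=
  String.ofList (((code.toList.splitOn '.').dropLast.foldl pvBStep (0, [])).2)

-- ===== PRECONDITION & SPEC =====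
def Spec_my_first_interpreter (code : String) (out : String) : Prop := out = my_first_interpreter_alt code
instance (code : String) (out : String) : Decidable (Spec_my_first_interpreter code out) := by unfold Spec_my_first_interpreter; infer_instance

-- ===== CLAIM (what is proved, stated in full; the proofs are below) =====
def Claim_equal_my_first_interpreter : Prop := ∀ (code : String), Dom_my_first_interpreter code → Spec_my_first_interpreter code (my_first_interpreter code)

-- ===== LEMMAS AND PROOFS =====

-- A's fold only ever appends to the output accumulator
theorem pvA_prefix (cs : List Char) (out : List Char) (p : Nat) :
    cs.foldl pvAStep (out, p)
      = (out ++ (cs.foldl pvAStep ([], p)).1, (cs.foldl pvAStep ([], p)).2) := by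
  induction cs generalizing out p with
  | nil => simp
  | cons c cs ih =>
    simp only [List.foldl_cons, pvAStep, List.nil_append]
    by_cases h1 : c = '+'
    · rw [if_pos h1, if_pos h1]
      exact ih out ((p + 1) % 256)
    · rw [if_neg h1, if_neg h1]
      by_cases h2 : c = '.'
      · rw [if_pos h2, if_pos h2, ih (out ++ [Char.ofNat p]) p, ih [Char.ofNat p] p]
        simp
      · rw [if_neg h2, if_neg h2]
        exact ih out p

-- B's fold only ever appends to the output accumulator
theorem pvB_prefix (segs : List (List Char)) (p : Nat) (out : List Char) :
    segs.foldl pvBStep (p, out)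
      = ((segs.foldl pvBStep (p, [])).1, out ++ (segs.foldl pvBStep (p, [])).2) := by
  induction segs generalizing p out with
  | nil => simp
  | cons s segs ih =>
    simp only [List.foldl_cons, pvBStep]
    rw [ih _ (out ++ _), ih _ ([] ++ _)]
    simp

-- prepending a non-'+', non-'.' character to the first segment changes nothing
theorem pvB_cons_other (c : Char) (hc : c ≠ '+')
    (s : List Char) (rest : List (List Char)) (p : Nat) :
    (((c :: s) :: rest).dropLast.foldl pvBStep (p, [])).2
      = ((s :: rest).dropLast.foldl pvBStep (p, [])).2 := by
  cases rest with
  | nil => simp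
  | cons r rs =>
    simp [List.dropLast, pvBStep, hc]

-- prepending '+' to the first segment is the same as starting with the bumped pointer
theorem pvB_cons_plus (s : List Char) (rest : List (List Char)) (p : Nat) :
    ((('+' :: s) :: rest).dropLast.foldl pvBStep (p, [])).2
      = ((s :: rest).dropLast.foldl pvBStep ((p + 1) % 256, [])).2 := by
  cases rest with
  | nil => simp
  | cons r rs =>
    have hp : (p + (s.count '+' + 1)) % 256 = ((p + 1) % 256 + s.count '+') % 256 := by
      rw [Nat.mod_add_mod]; ring_nf
    simp only [List.dropLast, List.foldl_cons, pvBStep, List.count_cons, beq_self_eq_true,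
      if_true]
    rw [hp]

-- main loop invariant: A's character fold equals B's segment fold, for any pointer < 256
theorem pv_main (cs : List Char) (p : Nat) (hp : p < 256) :
    (cs.foldl pvAStep ([], p)).1
      = ((cs.splitOn '.').dropLast.foldl pvBStep (p, [])).2 := by
  induction cs generalizing p with
  | nil => simp [List.splitOn_nil]
  | cons c cs ih =>
    have hne : cs.splitOn '.' ≠ [] := by
      unfold List.splitOn; exact List.splitOnP_ne_nil _ _
    obtain ⟨s, rest, hsr⟩ : ∃ s rest, cs.splitOn '.' = s :: rest := by
      cases h : cs.splitOn '.' with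
      | nil => exact absurd h hne
      | cons a b => exact ⟨a, b, rfl⟩
    by_cases h1 : c = '+'
    · have hsplit : (c :: cs).splitOn '.' = ('+' :: s) :: rest := by
        unfold List.splitOn
        rw [List.splitOnP_cons]
        simp only [h1]
        rw [if_neg (by decide)]
        unfold List.splitOn at hsr
        rw [hsr, List.modifyHead]
      rw [hsplit, pvB_cons_plus, ← hsr, ← ih _ (Nat.mod_lt _ (by omega))]
      simp [pvAStep, h1]
    · by_cases h2 : c = '.'
      · have hsplit : (c :: cs).splitOn '.' = [] :: s :: rest := by
          unfold List.splitOn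
          rw [List.splitOnP_cons]
          rw [if_pos (by simp [h2])]
          unfold List.splitOn at hsr
          rw [hsr]
        rw [hsplit]
        simp only [List.foldl_cons, pvAStep, h2, if_true]
        rw [pvA_prefix]
        simp only [List.dropLast, List.foldl_cons, pvBStep]
        rw [pvB_prefix]
        simp only [Nat.add_zero, List.count_nil, Nat.mod_eq_of_lt hp, List.nil_append]
        rw [← hsr, ← ih p hp]
        simp
      · have hsplit : (c :: cs).splitOn '.' = (c :: s) :: rest := by
          unfold List.splitOn
          rw [List.splitOnP_cons]
          rw [if_neg (by simp [h2])]
          unfold List.splitOn at hsr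
          rw [hsr, List.modifyHead]
        rw [hsplit, pvB_cons_other c h1, ← hsr, ← ih p hp]
        simp [pvAStep, h1, h2]

-- ===== VERDICT (by name: the statement is the Claim_ definition above) =====
theorem my_first_interpreter_spec : Claim_equal_my_first_interpreter := by
  intro code _
  unfold Spec_my_first_interpreter my_first_interpreter my_first_interpreter_alt
  rw [pv_main _ 0 (by omega)]
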